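-- pv_equiv track=rewrite | github.com/wahonet/relics-platform | platform/scripts/step03_extract_photos.py | merge_photo_index
-- ===== SOURCE A (Python) =====
-- from collections import defaultdict
--
-- def merge_photo_index(
--     existing_rows: list[dict],
--     new_by_code: dict[str, list[dict]],
--     processed_codes: set[str],
-- ) -> list[dict]:
--     by_code_old: dict[str, list[dict]] = defaultdict(list)
--     for row in existing_rows:
--         code = (row.get("archive_code") or "").strip()
--         if code:
--             by_code_old[code].append(row)
--
--     all_codes = set(by_code_old.keys()) | set(processed_codes)
--     merged = []
--     for code in sorted(all_codes):
--         if code in processed_codes: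
--             merged.extend(new_by_code.get(code, []))
--         else:
--             merged.extend(by_code_old.get(code, []))
--
--     deduped: dict[tuple, dict] = {}
--     for row in merged:
--         key = (
--             (row.get("archive_code") or "").strip(),
--             (row.get("relative_path") or "").strip(),
--         )
--         if not key[0]:
--             continue
--         deduped[key] = row
--     out = list(deduped.values())
--     out.sort(key=lambda r: (
--         r.get("archive_code", ""),
--         r.get("photo_no", ""),
--         r.get("relative_path", ""),
--     ))
--     return out
-- ===== SOURCE B (Python) =====
-- def merge_photo_index(
--     existing_rows: list[dict],
--     new_by_code: dict[str, list[dict]],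
--     processed_codes: set[str],
-- ) -> list[dict]:
--     # Tag each surviving row with its source group code, then one stable sort
--     # by that code replaces A's grouping dict / code-set union / merge loop.
--     tagged = []
--     for row in existing_rows:
--         code = (row.get("archive_code") or "").strip()
--         if code and code not in processed_codes:
--             tagged.append((code, row))
--     for code in processed_codes:
--         tagged.extend((code, row) for row in new_by_code.get(code, []))
--     tagged.sort(key=lambda t: t[0])
--
--     deduped: dict[tuple, dict] = {}
--     for _, row in tagged:
--         key = (
--             (row.get("archive_code") or "").strip(),
--             (row.get("relative_path") or "").strip(),
--         )
--         if not key[0]: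
--             continue
--         deduped[key] = row
--     out = list(deduped.values())
--     out.sort(key=lambda r: (
--         r.get("archive_code", ""),
--         r.get("photo_no", ""),
--         r.get("relative_path", ""),
--     ))
--     return out
-- ===== Notes on version B (the rewrite author's own statement) =====
-- stated objective: simpler
-- what changed: B drops A's by_code_old grouping dict, the all_codes set union and the sorted-codes merge loop: it tags each surviving row with its source group code in two plain passes and lets one stable sort by that code produce the merged order, then deduplicates and sorts exactly as A does.
import Mathlib
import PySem

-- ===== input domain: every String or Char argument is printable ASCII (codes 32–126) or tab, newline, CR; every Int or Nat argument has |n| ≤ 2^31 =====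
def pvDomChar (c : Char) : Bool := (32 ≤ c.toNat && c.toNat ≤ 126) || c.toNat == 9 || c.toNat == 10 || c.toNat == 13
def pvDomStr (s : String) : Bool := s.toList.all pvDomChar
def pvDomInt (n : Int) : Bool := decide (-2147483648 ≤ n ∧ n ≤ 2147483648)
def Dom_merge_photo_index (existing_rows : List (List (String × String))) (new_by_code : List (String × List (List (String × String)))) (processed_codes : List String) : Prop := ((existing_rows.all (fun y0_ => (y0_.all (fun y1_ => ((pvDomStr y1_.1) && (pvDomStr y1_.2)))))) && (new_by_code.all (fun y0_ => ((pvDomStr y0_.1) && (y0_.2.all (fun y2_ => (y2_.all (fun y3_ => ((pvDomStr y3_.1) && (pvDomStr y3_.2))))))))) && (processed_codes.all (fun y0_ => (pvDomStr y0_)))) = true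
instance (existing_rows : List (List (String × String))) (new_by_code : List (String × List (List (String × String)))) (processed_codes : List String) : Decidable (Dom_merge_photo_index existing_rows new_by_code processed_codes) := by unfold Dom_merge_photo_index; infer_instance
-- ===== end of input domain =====

-- ===== PORT A =====
-- B reorganises only the merge phase (tag rows + one stable sort instead of a grouping
-- dict + code-set union + sorted-codes loop); dedup and the final sort are unchanged.
-- Shared row helpers ((row.get(k) or "").strip(), the 3-tuple sort key — identical lines in both Pythons):

-- (row.get(k) or "") and row.get(k, "") : first-match lookup in the association list, default ""
def pvGet (row : List (String × String)) (k : String) : String := (row.lookup k).getD ""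

def pvCode (row : List (String × String)) : String := PySem.Str.strip (pvGet row "archive_code")

def pvPath (row : List (String × String)) : String := PySem.Str.strip (pvGet row "relative_path")

def pvKey3 (r : List (String × String)) : String × String × String :=
  (pvGet r "archive_code", pvGet r "photo_no", pvGet r "relative_path")

-- Python's lexicographic order on a 3-tuple of strings, written out (Lean's Prod '<' is not lexicographic)
def pvLt3 (a b : String × String × String) : Bool :=
  decide (a.1 < b.1) || (a.1 == b.1 && (decide (a.2.1 < b.2.1) || (a.2.1 == b.2.1 && decide (a.2.2 < b.2.2))))

-- out.sort(key=lambda r: (code, photo_no, path)) : hand-port of the stable sort with an explicit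
-- tuple comparator (PySem.List.sorted's insertion-sort shape, cf. sorted_eq_foldl_insertBy); exact
-- for Python's tuple-of-str comparison since both components compare by code point.
def pvSortRows (xs : List (List (String × String))) : List (List (String × String)) :=
  xs.foldl (fun acc r => PySem.List.insertBy (fun a b => pvLt3 (pvKey3 a) (pvKey3 b)) r acc) []

def merge_photo_index (existing_rows : List (List (String × String))) (new_by_code : List (String × List (List (String × String)))) (processed_codes : List String) : List (List (String × String)) :=
  let by_code_old : PySem.Dict String (List (List (String × String))) :=
    existing_rows.foldl (fun d row =>
      let code := pvCode row
      if code ≠ "" then d.modify code [] (fun g => g ++ [row]) else d) PySem.Dict.empty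
  let all_codes : PySem.Set String :=
    PySem.Set.union (PySem.Set.ofList by_code_old.keys) (PySem.Set.ofList processed_codes)
  let merged : List (List (String × String)) :=
    (PySem.List.sorted all_codes (fun c => c)).foldl (fun acc code =>
      if processed_codes.contains code then acc ++ ((new_by_code.lookup code).getD [])
      else acc ++ (by_code_old.getD code [])) []
  let deduped : PySem.Dict (String × String) (List (String × String)) :=
    merged.foldl (fun d row =>
      let key := (pvCode row, pvPath row)
      if key.1 ≠ "" then d.insert key row else d) PySem.Dict.empty
  pvSortRows deduped.values

-- ===== PORT B =====
def pvOldKeep (processed_codes : List String) (code : String) : Bool :=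
  code != "" && !(processed_codes.contains code)

def merge_photo_index_alt (existing_rows : List (List (String × String))) (new_by_code : List (String × List (List (String × String)))) (processed_codes : List String) : List (List (String × String)) :=
  let tagged0 : List (String × List (String × String)) :=
    existing_rows.foldl (fun acc row =>
      if pvOldKeep processed_codes (pvCode row) then acc ++ [(pvCode row, row)] else acc) []
  let tagged : List (String × List (String × String)) :=
    processed_codes.foldl (fun acc code =>
      acc ++ ((new_by_code.lookup code).getD []).map (fun row => (code, row))) tagged0
  let sortedTagged := PySem.List.sorted tagged (fun t => t.1)
  let deduped : PySem.Dict (String × String) (List (String × String)) :=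
    sortedTagged.foldl (fun d t =>
      let key := (pvCode t.2, pvPath t.2)
      if key.1 ≠ "" then d.insert key t.2 else d) PySem.Dict.empty
  pvSortRows deduped.values

-- ===== PRECONDITION & SPEC =====
-- processed_codes is a Python set; a list encoding with duplicate elements represents no set
-- input, so Pre_ only demands distinctness (no input A accepts is excluded).
def Pre_merge_photo_index (existing_rows : List (List (String × String))) (new_by_code : List (String × List (List (String × String)))) (processed_codes : List String) : Prop :=
  processed_codes.Nodup
instance (existing_rows : List (List (String × String))) (new_by_code : List (String × List (List (String × String)))) (processed_codes : List String) : Decidable (Pre_merge_photo_index existing_rows new_by_code processed_codes) := by unfold Pre_merge_photo_index; infer_instance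

def pvWitness_merge_photo_index : (List (List (String × String))) × (List (String × List (List (String × String)))) × List String :=
  ([[("archive_code", "b"), ("relative_path", "p")]],
   [("a", [[("archive_code", "a"), ("relative_path", "q")]])],
   ["a"])

def Spec_merge_photo_index (existing_rows : List (List (String × String))) (new_by_code : List (String × List (List (String × String)))) (processed_codes : List String) (out : List (List (String × String))) : Prop := out = merge_photo_index_alt existing_rows new_by_code processed_codes
instance (existing_rows : List (List (String × String))) (new_by_code : List (String × List (List (String × String)))) (processed_codes : List String) (out : List (List (String × String))) : Decidable (Spec_merge_photo_index existing_rows new_by_code processed_codes out) := by unfold Spec_merge_photo_index; infer_instance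

-- ===== CLAIM (what is proved, stated in full; the proofs are below) =====
def Claim_equal_merge_photo_index : Prop := ∀ (existing_rows : List (List (String × String))) (new_by_code : List (String × List (List (String × String)))) (processed_codes : List String), Dom_merge_photo_index existing_rows new_by_code processed_codes → Pre_merge_photo_index existing_rows new_by_code processed_codes → Spec_merge_photo_index existing_rows new_by_code processed_codes (merge_photo_index existing_rows new_by_code processed_codes)

-- ===== LEMMAS AND PROOFS =====

theorem pv_insertBy_append_left {A : Type} (before : A → A → Bool) (x : A) (L B : List A)
    (h : ∀ a ∈ L, before x a = false) :
    PySem.List.insertBy before x (L ++ B) = L ++ PySem.List.insertBy before x B := by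
  induction L with
  | nil => rfl
  | cons a t ih =>
      simp only [List.cons_append, PySem.List.insertBy, h a (by simp)]
      simp only [Bool.false_eq_true, if_false, List.cons.injEq, true_and]
      exact ih (fun a ha => h a (by simp [ha]))

theorem pv_insertBy_all_before {A : Type} (before : A → A → Bool) (x : A) (B : List A)
    (h : ∀ y ∈ B, before x y = true) :
    PySem.List.insertBy before x B = x :: B := by
  cases B with
  | nil => rfl
  | cons b t => simp [PySem.List.insertBy, h b (by simp)]

theorem pv_dropWhile_ge {K : Type} [LinearOrder K] (c : K) (CS : List K)
    (h : CS.Pairwise (· < ·)) :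
    ∀ v ∈ CS.dropWhile (fun y => decide (y < c)), ¬ (v < c) := by
  induction CS with
  | nil => simp
  | cons a t ih =>
      intro v hv
      by_cases hac : a < c
      · simp only [List.dropWhile_cons, decide_eq_true_eq, hac, if_pos trivial] at hv
        · exact ih h.tail v (by simpa using hv)
      · simp only [List.dropWhile_cons, decide_eq_true_eq, hac, if_false] at hv
        rcases List.mem_cons.mp hv with rfl | hv
        · exact hac
        · have hav : a < v := (List.pairwise_cons.mp h).1 v hv
          exact fun hlt => hac (lt_trans hav hlt)

theorem pv_flatMap_congr {A B : Type} (L : List A) (f g : A → List B)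
    (h : ∀ a ∈ L, f a = g a) : L.flatMap f = L.flatMap g := by
  induction L with
  | nil => rfl
  | cons a t ih => simp [List.flatMap_cons, h a (by simp), ih (fun a ha => h a (by simp [ha]))]

theorem stable_sort_groups {A K : Type} [LinearOrder K] [BEq K] [LawfulBEq K]
    (key : A → K) (l : List A) :
    PySem.List.sorted l key =
      (PySem.List.sorted (PySem.Set.ofList (l.map key)) (fun c => c)).flatMap
        (fun x => l.filter (fun y => key y == x)) := by
  induction l using List.reverseRecOn with
  | nil => rfl
  | append_singleton l x ih =>
    set c := key x with hc
    set CS := PySem.List.sorted (PySem.Set.ofList (l.map key)) (fun c => c) with hCS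
    set grp : K → List A := fun u => l.filter (fun y => key y == u) with hgrp
    set grp' : K → List A := fun u => (l ++ [x]).filter (fun y => key y == u) with hgrp'
    have hCSpair : CS.Pairwise (· < ·) := PySem.List.sorted_ofList_pairwise_lt _
    have hCSmem : ∀ u, u ∈ CS ↔ u ∈ l.map key := by
      intro u
      rw [hCS, PySem.List.mem_sorted, PySem.Set.mem_ofList]
    have hCSnodup : CS.Nodup := (PySem.List.sorted_perm _ _ _).nodup_iff.mpr (PySem.Set.nodup_ofList _)
    set U := CS.takeWhile (fun y => decide (y < c)) with hU
    set V := CS.dropWhile (fun y => decide (y < c)) with hV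
    have hUV : U ++ V = CS := List.takeWhile_append_dropWhile
    have hUlt : ∀ u ∈ U, u < c := by
      intro u hu
      have := List.mem_takeWhile_imp hu
      simpa using this
    have hVge : ∀ v ∈ V, ¬ v < c := pv_dropWhile_ge c CS hCSpair
    have hpairUV : U.Pairwise (· < ·) ∧ V.Pairwise (· < ·) ∧ ∀ u ∈ U, ∀ v ∈ V, u < v := by
      have := hUV ▸ hCSpair
      exact ⟨(List.pairwise_append.mp this).1, (List.pairwise_append.mp this).2.1,
        (List.pairwise_append.mp this).2.2⟩
    -- grp' agrees with grp away from c
    have hgrp_ne : ∀ u, u ≠ c → grp' u = grp u := by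
      intro u hu
      simp only [hgrp', hgrp, List.filter_append, List.filter_cons, List.filter_nil]
      have : (key x == u) = false := by
        rw [← hc]; exact beq_eq_false_iff_ne.mpr (fun h => hu h.symm)
      simp [this]
    have hgrp_c : grp' c = grp c ++ [x] := by
      simp [hgrp', hgrp, List.filter_append, List.filter_cons, ← hc]
    -- LHS = insertBy x (CS.flatMap grp)
    have hLHS : PySem.List.sorted (l ++ [x]) key =
        PySem.List.insertBy (fun a b => decide (key a < key b)) x (CS.flatMap grp) := by
      rw [PySem.List.sorted_eq_foldl_insertBy, List.foldl_append, List.foldl_cons, List.foldl_nil,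
        ← PySem.List.sorted_eq_foldl_insertBy, ih]
    have hpassU : ∀ a ∈ U.flatMap grp, (fun a b => decide (key a < key b)) x a = false := by
      intro a ha
      obtain ⟨u, hu, hau⟩ := List.mem_flatMap.mp ha
      have : key a = u := by simpa using (List.of_mem_filter hau)
      simp only [← hc, this, decide_eq_false_iff_not]
      exact fun h => lt_irrefl c (lt_trans h (hUlt u hu))
    by_cases hcmem : c ∈ l.map key
    · -- c already among the keys: code list unchanged, x goes to the end of its group
      obtain ⟨V₁, hV1⟩ : ∃ V₁, V = c :: V₁ := by
        have hcV : c ∈ V := by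
          have : c ∈ CS := (hCSmem c).mpr hcmem
          rw [← hUV] at this
          rcases List.mem_append.mp this with h | h
          · exact absurd (hUlt c h) (lt_irrefl c)
          · exact h
        cases hVeq : V with
        | nil => rw [hVeq] at hcV; cases hcV
        | cons v0 V' =>
          rw [hVeq] at hcV
          rcases List.mem_cons.mp hcV with h | h
          · exact ⟨V', by rw [h]⟩
          · have hv0c : v0 < c := by
              have := hpairUV.2.1
              rw [hVeq] at this
              exact (List.pairwise_cons.mp this).1 c h
            exact absurd hv0c (hVge v0 (by rw [hVeq]; simp))
      have hV1lt : ∀ v ∈ V₁, c < v := by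
        have := hpairUV.2.1
        rw [hV1] at this
        exact (List.pairwise_cons.mp this).1
      -- sorted code set unchanged
      have hCS' : PySem.List.sorted (PySem.Set.ofList ((l ++ [x]).map key)) (fun c => c) = CS := by
        have : PySem.Set.ofList ((l ++ [x]).map key) = PySem.Set.ofList (l.map key) := by
          rw [List.map_append, List.map_cons, List.map_nil, PySem.Set.ofList_eq_foldl,
            List.foldl_append, List.foldl_cons, List.foldl_nil, ← PySem.Set.ofList_eq_foldl]
          show PySem.Set.add _ _ = _
          unfold PySem.Set.add
          rw [if_pos ((PySem.Set.contains_iff _ _).mpr (PySem.Set.mem_ofList _ _ |>.mpr hcmem))]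
        rw [this, ← hCS]
      rw [hLHS, hCS', ← hUV, hV1]
      rw [List.flatMap_append, List.flatMap_cons, ← List.append_assoc]
      rw [pv_insertBy_append_left _ x (U.flatMap grp ++ grp c) (V₁.flatMap grp) ?passUc]
      case passUc =>
        intro a ha
        rcases List.mem_append.mp ha with h | h
        · exact hpassU a h
        · have : key a = c := by simpa using (List.of_mem_filter h)
          simp [← hc, this]
      rw [pv_insertBy_all_before _ x (V₁.flatMap grp) ?befV]
      case befV =>
        intro a ha
        obtain ⟨v, hv, hav⟩ := List.mem_flatMap.mp ha
        have : key a = v := by simpa using (List.of_mem_filter hav)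
        simp only [← hc, this, decide_eq_true_eq]
        exact hV1lt v hv
      rw [List.flatMap_append, List.flatMap_cons,
        pv_flatMap_congr U grp' grp (fun u hu => hgrp_ne u (ne_of_lt (hUlt u hu))),
        pv_flatMap_congr V₁ grp' grp (fun v hv => hgrp_ne v (ne_of_gt (hV1lt v hv))),
        hgrp_c]
      simp
    · -- c is a fresh key: it is inserted between U and V, with group [x]
      have hgrpc_nil : grp c = [] := by
        rw [hgrp]
        apply List.filter_eq_nil_iff.mpr
        intro y hy hk
        exact hcmem (List.mem_map.mpr ⟨y, hy, by simpa using hk⟩)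
      have hVlt : ∀ v ∈ V, c < v := by
        intro v hv
        have hne : v ≠ c := by
          intro h
          apply hcmem
          have : v ∈ CS := by rw [← hUV]; exact List.mem_append.mpr (Or.inr hv)
          exact h ▸ (hCSmem v).mp this
        exact lt_of_le_of_ne (not_lt.mp (hVge v hv)) (Ne.symm hne)
      have hofl : PySem.Set.ofList ((l ++ [x]).map key) = PySem.Set.ofList (l.map key) ++ [c] := by
        rw [List.map_append, List.map_cons, List.map_nil, PySem.Set.ofList_eq_foldl,
          List.foldl_append, List.foldl_cons, List.foldl_nil, ← PySem.Set.ofList_eq_foldl]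
        show PySem.Set.add _ _ = _
        unfold PySem.Set.add
        rw [if_neg]
        intro h
        exact hcmem ((PySem.Set.mem_ofList _ _).mp ((PySem.Set.contains_iff _ _).mp h))
      have hCS' : PySem.List.sorted (PySem.Set.ofList ((l ++ [x]).map key)) (fun c => c)
          = U ++ c :: V := by
        refine PySem.List.sorted_eq_of_perm_of_pairwise_lt _ _ _ ?_ ?_
        · rw [hofl]
          refine (List.Perm.append_left U (List.perm_append_singleton c V).symm).trans ?_
          rw [← List.append_assoc, hUV]
          exact (PySem.List.sorted_perm _ _ _).append_right _
        · apply List.pairwise_append.mpr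
          refine ⟨hpairUV.1, ?_, ?_⟩
          · exact List.pairwise_cons.mpr ⟨hVlt, hpairUV.2.1⟩
          · intro u hu v hv
            rcases List.mem_cons.mp hv with rfl | hv
            · exact hUlt u hu
            · exact hpairUV.2.2 u hu v hv
      rw [hLHS, hCS', ← hUV]
      rw [List.flatMap_append, List.flatMap_append, List.flatMap_cons]
      rw [pv_insertBy_append_left _ _ _ _ hpassU]
      rw [pv_insertBy_all_before _ x (V.flatMap grp) ?befV2]
      case befV2 =>
        intro a ha
        obtain ⟨v, hv, hav⟩ := List.mem_flatMap.mp ha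
        have : key a = v := by simpa using (List.of_mem_filter hav)
        simp only [← hc, this, decide_eq_true_eq]
        exact hVlt v hv
      rw [pv_flatMap_congr U grp' grp (fun u hu => hgrp_ne u (ne_of_lt (hUlt u hu))),
        pv_flatMap_congr V grp' grp (fun v hv => hgrp_ne v (ne_of_gt (hVlt v hv))),
        hgrp_c, hgrpc_nil]
      simp


def pvOldD (E : List (List (String × String))) : PySem.Dict String (List (List (String × String))) :=
  E.foldl (fun d row => if pvCode row ≠ "" then d.modify (pvCode row) [] (fun g => g ++ [row]) else d)
    PySem.Dict.empty

def pvTaggedL (E : List (List (String × String))) (N : List (String × List (List (String × String)))) (P : List String) : List (String × List (String × String)) :=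
  P.foldl (fun acc code => acc ++ ((N.lookup code).getD []).map (fun row => (code, row)))
    (E.foldl (fun acc row => if pvOldKeep P (pvCode row) then acc ++ [(pvCode row, row)] else acc) [])

def pvGA (E : List (List (String × String))) (N : List (String × List (List (String × String)))) (P : List String) (c : String) : List (List (String × String)) :=
  if P.contains c then ((N.lookup c).getD []) else ((pvOldD E).getD c [])

theorem pv_getD_old (E : List (List (String × String))) (c : String) :
    (pvOldD E).getD c [] = E.filter (fun r => decide (pvCode r ≠ "") && (pvCode r == c)) := by
  induction E using List.reverseRecOn with
  | nil => simp [pvOldD, PySem.Dict.getD_empty]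
  | append_singleton E r ih =>
    rw [pvOldD, List.foldl_append, List.foldl_cons, List.foldl_nil, ← pvOldD]
    by_cases h : pvCode r ≠ ""
    · rw [if_pos h, PySem.Dict.getD_modify, List.filter_append]
      by_cases hc : c = pvCode r
      · subst hc
        rw [ih]
        simp [h]
      · rw [if_neg hc, ih]
        have : (pvCode r == c) = false := beq_eq_false_iff_ne.mpr (fun hh => hc hh.symm)
        simp [List.filter_cons, this]
    · rw [if_neg h, ih, List.filter_append]
      simp at h
      simp [List.filter_cons, h]

theorem pv_mem_keys_old (E : List (List (String × String))) (c : String) :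
    c ∈ (pvOldD E).keys ↔ ∃ r ∈ E, pvCode r ≠ "" ∧ pvCode r = c := by
  induction E using List.reverseRecOn with
  | nil => simp [pvOldD, PySem.Dict.keys_empty]
  | append_singleton E r ih =>
    rw [pvOldD, List.foldl_append, List.foldl_cons, List.foldl_nil, ← pvOldD]
    by_cases h : pvCode r ≠ ""
    · rw [if_pos h]
      rw [PySem.Dict.keys_modify]
      rw [show ∀ (d : PySem.Dict String (List (List (String × String)))) k v, (c ∈ (d.insert k v).keys ↔ c = k ∨ c ∈ d.keys) from fun d k v => PySem.Dict.mem_keys_insert d k c v]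
      constructor
      · rintro (rfl | hm)
        · exact ⟨r, by simp, h, rfl⟩
        · obtain ⟨r', hr', hne, hc⟩ := ih.mp hm
          exact ⟨r', by simp [hr'], hne, hc⟩
      · rintro ⟨r', hr', hne, hc⟩
        rcases List.mem_append.mp hr' with hr' | hr'
        · exact Or.inr (ih.mpr ⟨r', hr', hne, hc⟩)
        · simp at hr'; subst hr'; exact Or.inl hc.symm
    · rw [if_neg h]
      simp only [ne_eq, not_not] at h
      rw [ih]
      constructor
      · rintro ⟨r', hr', hne, hc⟩; exact ⟨r', by simp [hr'], hne, hc⟩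
      · rintro ⟨r', hr', hne, hc⟩
        rcases List.mem_append.mp hr' with hr' | hr'
        · exact ⟨r', hr', hne, hc⟩
        · simp at hr'; subst hr'; exact absurd h hne

theorem pv_tagged_eq (E : List (List (String × String))) (N : List (String × List (List (String × String)))) (P : List String) :
    pvTaggedL E N P =
      (E.filter (fun r => pvOldKeep P (pvCode r))).map (fun r => (pvCode r, r)) ++
        P.flatMap (fun c => ((N.lookup c).getD []).map (fun row => (c, row))) := by
  rw [pvTaggedL, PySem.List.foldl_append_if, PySem.List.foldl_append_eq_flatMap, List.nil_append]

theorem pv_flatMap_single {β : Type} (P : List String) (hP : P.Nodup) (c : String) (L : String → List β) :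
    P.flatMap (fun c' => if c' = c then L c' else []) = if c ∈ P then L c else [] := by
  induction P with
  | nil => simp
  | cons p t ih =>
    rw [List.flatMap_cons]
    by_cases hpc : p = c
    · subst hpc
      have : t.flatMap (fun c' => if c' = p then L c' else []) = [] := by
        apply List.flatMap_eq_nil_iff.mpr
        intro c' hc'
        rw [if_neg]
        rintro rfl
        exact (List.nodup_cons.mp hP).1 hc'
      simp [this]
    · rw [if_neg hpc, List.nil_append, ih (List.nodup_cons.mp hP).2]
      have : (c ∈ p :: t) ↔ c ∈ t := by
        constructor
        · intro h
          rcases List.mem_cons.mp h with h | h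
          · exact absurd h.symm hpc
          · exact h
        · exact fun h => List.mem_cons.mpr (Or.inr h)
      simp only [this]

theorem pv_fiber (E : List (List (String × String))) (N : List (String × List (List (String × String)))) (P : List String) (hP : P.Nodup) (c : String) :
    ((pvTaggedL E N P).filter (fun t => t.1 == c)).map Prod.snd = pvGA E N P c := by
  rw [pv_tagged_eq, List.filter_append, List.map_append, List.filter_map, List.filter_flatMap]
  have hnew : (P.flatMap fun a => List.filter (fun t => t.1 == c) (((N.lookup a).getD []).map (fun row => (a, row))))
      = if c ∈ P then ((N.lookup c).getD []).map (fun row => (c, row)) else [] := by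
    rw [← pv_flatMap_single P hP c (fun c' => ((N.lookup c').getD []).map (fun row => (c', row)))]
    congr 1
    funext a
    rw [List.filter_map]
    by_cases hac : a = c
    · subst hac
      rw [if_pos rfl]
      congr 1
      apply List.filter_eq_self.mpr
      intro b _
      simp
    · rw [if_neg hac]
      have : (List.filter ((fun t => t.1 == c) ∘ fun row => (a, row)) ((N.lookup a).getD [])) = [] := by
        apply List.filter_eq_nil_iff.mpr
        intro b _
        simpa using hac
      rw [this, List.map_nil]
  rw [hnew]
  by_cases hc : c ∈ P
  · rw [if_pos hc, pvGA, if_pos (List.contains_iff_mem.mpr hc)]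
    have hold : List.filter ((fun t => t.1 == c) ∘ fun r => (pvCode r, r)) (E.filter fun r => pvOldKeep P (pvCode r)) = [] := by
      apply List.filter_eq_nil_iff.mpr
      intro r hr
      simp only [Function.comp, beq_iff_eq]
      rintro rfl
      have := (List.mem_filter.mp hr).2
      rw [pvOldKeep] at this
      simp at this
      exact this.2 hc
    rw [hold]
    simp
  · have hcont : P.contains c = false := by
      rcases h : P.contains c with _ | _
      · rfl
      · exact absurd (List.contains_iff_mem.mp h) hc
    rw [if_neg hc, pvGA, hcont, if_neg (by simp), pv_getD_old]
    simp only [List.map_nil, List.append_nil]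
    rw [List.map_map, List.filter_filter]
    have hsnd : (Prod.snd ∘ fun r : List (String × String) => (pvCode r, r)) = id := by
      funext r; rfl
    rw [hsnd, List.map_id]
    apply List.filter_congr
    intro r _
    by_cases hrc : pvCode r = c
    · subst hrc
      simp [pvOldKeep, hc, bne, beq_eq_decide]
    · have : (pvCode r == c) = false := beq_eq_false_iff_ne.mpr hrc
      simp [this]

def pvCodesA (E : List (List (String × String))) (P : List String) : List String :=
  PySem.List.sorted (PySem.Set.union (PySem.Set.ofList (pvOldD E).keys) (PySem.Set.ofList P)) (fun c => c)

theorem pv_codesA_pairwise (E : List (List (String × String))) (P : List String) :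
    (pvCodesA E P).Pairwise (· < ·) := by
  rw [pvCodesA, ← PySem.Set.ofList_eq_self_of_nodup
    (PySem.Set.union (PySem.Set.ofList (pvOldD E).keys) (PySem.Set.ofList P))
    (PySem.Set.nodup_union _ _ (PySem.Set.nodup_ofList _))]
  exact PySem.List.sorted_ofList_pairwise_lt _

theorem pv_mem_codesA (E : List (List (String × String))) (P : List String) (a : String) :
    a ∈ pvCodesA E P ↔ a ∈ (pvOldD E).keys ∨ a ∈ P := by
  rw [pvCodesA, PySem.List.mem_sorted, PySem.Set.mem_union, PySem.Set.mem_ofList, PySem.Set.mem_ofList]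

theorem pv_mem_tagged_fst (E : List (List (String × String))) (N : List (String × List (List (String × String)))) (P : List String) (a : String) :
    a ∈ (pvTaggedL E N P).map Prod.fst ↔
      (∃ r ∈ E, pvOldKeep P (pvCode r) = true ∧ pvCode r = a) ∨
        (a ∈ P ∧ ((N.lookup a).getD []) ≠ []) := by
  rw [pv_tagged_eq]
  simp only [List.map_append, List.mem_append, List.map_map, List.map_flatMap, Function.comp,
    List.mem_map, List.mem_filter, List.mem_flatMap]
  constructor
  · rintro (⟨r, ⟨hr, hk⟩, ha⟩ | ⟨c', hc', row, hrow, he⟩)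
    · exact Or.inl ⟨r, hr, hk, ha⟩
    · subst he
      exact Or.inr ⟨hc', fun hnil => by rw [hnil] at hrow; cases hrow⟩
  · rintro (⟨r, hr, hk, ha⟩ | ⟨ha, hne⟩)
    · exact Or.inl ⟨r, ⟨hr, hk⟩, ha⟩
    · obtain ⟨row, hrow⟩ := List.exists_mem_of_ne_nil _ hne
      exact Or.inr ⟨a, ha, row, hrow, rfl⟩

theorem pv_codes (E : List (List (String × String))) (N : List (String × List (List (String × String)))) (P : List String) (hP : P.Nodup) :
    PySem.List.sorted (PySem.Set.ofList ((pvTaggedL E N P).map Prod.fst)) (fun c => c)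
      = (pvCodesA E P).filter (fun c => !(pvGA E N P c).isEmpty) := by
  apply PySem.List.sorted_eq_of_perm_of_pairwise_lt
  · apply (List.perm_ext_iff_of_nodup ?nd1 ?nd2).mpr
    case nd1 =>
      exact List.Nodup.filter _
        ((PySem.List.sorted_perm _ _ _).nodup_iff.mpr
          (PySem.Set.nodup_union _ _ (PySem.Set.nodup_ofList _)))
    case nd2 => exact PySem.Set.nodup_ofList _
    intro a
    rw [List.mem_filter, PySem.Set.mem_ofList, pv_mem_tagged_fst, pv_mem_codesA]
    rw [show (!(pvGA E N P a).isEmpty) = true ↔ pvGA E N P a ≠ [] by simp [List.isEmpty_iff]]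
    by_cases ha : a ∈ P
    · have hcont : P.contains a = true := List.contains_iff_mem.mpr ha
      rw [pvGA, if_pos hcont]
      constructor
      · rintro ⟨_, hne⟩
        exact Or.inr ⟨ha, hne⟩
      · rintro (⟨r, _, hk, hc⟩ | ⟨_, hne⟩)
        · rw [pvOldKeep, hc] at hk
          simp [ha] at hk
        · exact ⟨Or.inr ha, hne⟩
    · have hcont : P.contains a = false := by
        rcases h : P.contains a with _ | _
        · rfl
        · exact absurd (List.contains_iff_mem.mp h) ha
      rw [pvGA, hcont, if_neg (by simp), pv_getD_old]
      constructor
      · rintro ⟨hmem, hne⟩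
        rcases hmem with hkeys | haP
        · left
          obtain ⟨r, hr, hcne, hc⟩ := (pv_mem_keys_old E a).mp hkeys
          refine ⟨r, hr, ?_, hc⟩
          rw [pvOldKeep, hc]
          simp [ha]
          intro h
          exact hcne (by rw [hc, h])
        · exact absurd haP ha
      · rintro (⟨r, hr, hk, hc⟩ | ⟨haP, _⟩)
        · constructor
          · left
            apply (pv_mem_keys_old E a).mpr
            refine ⟨r, hr, ?_, hc⟩
            rw [pvOldKeep] at hk
            simp at hk
            intro h
            exact absurd h (by simpa using hk.1)
          · intro hnil
            rw [List.filter_eq_nil_iff] at hnil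
            apply hnil r hr
            have hk' := hk
            rw [pvOldKeep] at hk'
            simp at hk'
            simp [hc]
            exact hc ▸ hk'.1
        · exact absurd haP ha
  · exact List.Pairwise.filter _ (pv_codesA_pairwise E P)

theorem pv_flatMap_drop_empty {α β : Type} (cs : List α) (G : α → List β) :
    cs.flatMap G = (cs.filter (fun c => !(G c).isEmpty)).flatMap G := by
  induction cs with
  | nil => rfl
  | cons c t ih =>
    rw [List.flatMap_cons, List.filter_cons]
    by_cases h : G c = []
    · simp [h, ← ih]
    · rw [if_pos (by simp [h]), List.flatMap_cons, ← ih]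

theorem pv_merged (E : List (List (String × String))) (N : List (String × List (List (String × String)))) (P : List String) (hP : P.Nodup) :
    (pvCodesA E P).foldl (fun acc code =>
        if P.contains code then acc ++ ((N.lookup code).getD [])
        else acc ++ ((pvOldD E).getD code [])) []
      = (PySem.List.sorted (pvTaggedL E N P) (fun t => t.1)).map Prod.snd := by
  have hbody : (fun (acc : List (List (String × String))) code =>
        if P.contains code then acc ++ ((N.lookup code).getD [])
        else acc ++ ((pvOldD E).getD code []))
      = fun acc code => acc ++ pvGA E N P code := by
    funext acc code
    rw [pvGA]
    by_cases h : P.contains code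
    · rw [if_pos h, if_pos h]
    · rw [if_neg h, if_neg h]
  rw [hbody, PySem.List.foldl_append_eq_flatMap, List.nil_append]
  rw [stable_sort_groups (fun t => t.1) (pvTaggedL E N P), List.map_flatMap]
  have hfib : (fun (c : String) => ((pvTaggedL E N P).filter (fun y => (fun t : String × List (String × String) => t.1) y == c)).map Prod.snd)
      = pvGA E N P := by
    funext c
    exact pv_fiber E N P hP c
  rw [hfib, pv_codes E N P hP, ← pv_flatMap_drop_empty]


def pvDedupD (rows : List (List (String × String))) : PySem.Dict (String × String) (List (String × String)) :=
  rows.foldl (fun d row => if pvCode row ≠ "" then d.insert (pvCode row, pvPath row) row else d)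
    PySem.Dict.empty

theorem pv_A_eq (E : List (List (String × String))) (N : List (String × List (List (String × String)))) (P : List String) :
    merge_photo_index E N P = pvSortRows (pvDedupD ((pvCodesA E P).foldl (fun acc code =>
      if P.contains code then acc ++ ((N.lookup code).getD [])
      else acc ++ ((pvOldD E).getD code [])) [])).values := rfl

theorem pv_B_eq (E : List (List (String × String))) (N : List (String × List (List (String × String)))) (P : List String) :
    merge_photo_index_alt E N P = pvSortRows ((PySem.List.sorted (pvTaggedL E N P) (fun t => t.1)).foldl
      (fun d t => if pvCode t.2 ≠ "" then d.insert (pvCode t.2, pvPath t.2) t.2 else d)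
      PySem.Dict.empty).values := rfl

theorem pv_dedup_map (l : List (String × List (String × String))) :
    pvDedupD (l.map Prod.snd) = l.foldl
      (fun d t => if pvCode t.2 ≠ "" then d.insert (pvCode t.2, pvPath t.2) t.2 else d)
      PySem.Dict.empty := by
  rw [pvDedupD, List.foldl_map]


theorem pv_final (E : List (List (String × String))) (N : List (String × List (List (String × String)))) (P : List String) (hP : P.Nodup) :
    merge_photo_index E N P = merge_photo_index_alt E N P := by
  rw [pv_A_eq, pv_B_eq, pv_merged E N P hP, pv_dedup_map]

-- ===== VERDICT (by name: the statement is the Claim_ definition above) =====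
theorem merge_photo_index_spec : Claim_equal_merge_photo_index := by
  intro existing_rows new_by_code processed_codes _ hPre
  unfold Spec_merge_photo_index
  exact pv_final existing_rows new_by_code processed_codes hPre
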